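-- pv_equiv track=rewrite | github.com/marginleft/xulai-skills | ai-tool-auditor/scripts/_shared.py | marker_count
-- ===== SOURCE A (Python) =====
-- def marker_count(lines: list[str], markers: tuple[str, ...]) -> int:
--     if not markers:
--         return 0
--     total = 0
--     unique_markers = tuple(marker for marker in dict.fromkeys(markers) if marker)
--     for line in lines:
--         if any(marker in line for marker in unique_markers):
--             total += 1
--     return total
-- ===== SOURCE B (Python) =====
-- def marker_count(lines: list[str], markers: tuple[str, ...]) -> int:
--     # Single left-to-right scan per line: at each position try every (non-empty)
--     # marker with startswith, instead of one full `in` substring search per marker.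
--     pats = [m for m in markers if m]
--     if not pats:
--         return 0
--
--     def search(line: str) -> bool:
--         for j in range(len(line) + 1):
--             for p in pats:
--                 if line.startswith(p, j):
--                     return True
--         return False
--
--     return sum(1 for line in lines if search(line))
-- ===== Notes on version B (the rewrite author's own statement) =====
-- stated objective: alternative
-- what changed: B drops the dedup pass and replaces the per-marker substring `in` searches by one left-to-right positional scan per line (startswith at every offset), counting matching lines with a sum over a generator instead of an accumulator loop.
import Mathlib
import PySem

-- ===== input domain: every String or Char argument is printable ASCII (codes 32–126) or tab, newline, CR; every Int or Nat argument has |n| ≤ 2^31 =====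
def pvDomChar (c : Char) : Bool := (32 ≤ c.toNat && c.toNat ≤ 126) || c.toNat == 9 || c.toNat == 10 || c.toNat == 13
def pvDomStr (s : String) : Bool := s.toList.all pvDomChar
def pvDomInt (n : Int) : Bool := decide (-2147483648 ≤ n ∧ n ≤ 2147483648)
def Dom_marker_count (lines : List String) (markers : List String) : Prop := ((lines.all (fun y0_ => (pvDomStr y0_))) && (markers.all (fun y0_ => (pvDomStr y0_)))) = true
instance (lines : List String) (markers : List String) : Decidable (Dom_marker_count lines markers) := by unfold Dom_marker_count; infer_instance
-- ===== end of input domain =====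

-- B replaces A's dedup + per-marker substring searches by one positional scan per line; alternative structure, no speed claim.


-- ===== PORT A =====
def marker_count (lines : List String) (markers : List String) : Int :=
  if markers = [] then 0
  else
    let unique_markers := (PySem.List.dedup markers).filter (fun m => decide (m ≠ ""))
    lines.foldl
      (fun total line =>
        if unique_markers.any (fun m => PySem.Str.isIn m line) then total + 1 else total)
      (0 : Int)

-- ===== PORT B =====
-- line.startswith(p, j) on the suffix starting at position j; the recursion walks j = 0, 1, …, len(line).
def pvSearch (pats : List String) : List Char → Bool
  | [] => pats.any (fun p => p.toList.isPrefixOf ([] : List Char))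
  | c :: t => pats.any (fun p => p.toList.isPrefixOf (c :: t)) || pvSearch pats t

def marker_count_alt (lines : List String) (markers : List String) : Int :=
  let pats := markers.filter (fun m => decide (m ≠ ""))
  if pats = [] then 0
  else ((lines.countP (fun line => pvSearch pats line.toList) : Nat) : Int)

-- ===== PRECONDITION & SPEC =====
def Spec_marker_count (lines : List String) (markers : List String) (out : Int) : Prop := out = marker_count_alt lines markers
instance (lines : List String) (markers : List String) (out : Int) : Decidable (Spec_marker_count lines markers out) := by unfold Spec_marker_count; infer_instance

-- ===== CLAIM (what is proved, stated in full; the proofs are below) =====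
def Claim_equal_marker_count : Prop := ∀ (lines : List String) (markers : List String), Dom_marker_count lines markers → Spec_marker_count lines markers (marker_count lines markers)

-- ===== LEMMAS AND PROOFS =====

-- B's positional scan succeeds iff some pattern is an infix of the line.
theorem pvSearch_eq_true_iff (pats : List String) (s : List Char) :
    pvSearch pats s = true ↔ ∃ p ∈ pats, p.toList <:+: s := by
  induction s with
  | nil =>
    simp [pvSearch, List.any_eq_true, List.infix_nil, List.prefix_nil]
  | cons c t ih =>
    simp only [pvSearch, Bool.or_eq_true, ih, List.any_eq_true]
    constructor
    · rintro (⟨p, hp, hpre⟩ | ⟨p, hp, hinf⟩)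
      · exact ⟨p, hp, (List.isPrefixOf_iff_prefix.mp hpre).isInfix⟩
      · exact ⟨p, hp, List.infix_cons_iff.mpr (Or.inr hinf)⟩
    · rintro ⟨p, hp, hinf⟩
      rcases List.infix_cons_iff.mp hinf with h | h
      · exact Or.inl ⟨p, hp, List.isPrefixOf_iff_prefix.mpr h⟩
      · exact Or.inr ⟨p, hp, h⟩

-- Per line, A's test over the deduped non-empty markers equals B's positional scan.
theorem per_line (markers : List String) (line : String) :
    ((PySem.List.dedup markers).filter (fun m => decide (m ≠ ""))).any
        (fun m => PySem.Str.isIn m line)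
      = pvSearch (markers.filter (fun m => decide (m ≠ ""))) line.toList := by
  rw [Bool.eq_iff_iff]
  simp only [List.any_eq_true, List.mem_filter, PySem.List.mem_dedup,
    pvSearch_eq_true_iff, PySem.Str.isIn_iff_infix]

theorem foldl_count (q : String → Bool) (lines : List String) (acc : Int) :
    lines.foldl (fun total line => if q line then total + 1 else total) acc
      = acc + ((lines.countP q : Nat) : Int) := by
  induction lines generalizing acc with
  | nil => simp
  | cons l t ih =>
    simp only [List.foldl_cons, List.countP_cons, ih]
    by_cases h : q l <;> simp [h] <;> omega

-- ===== VERDICT (by name: the statement is the Claim_ definition above) =====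
theorem marker_count_spec : Claim_equal_marker_count := by
  intro lines markers _
  unfold Spec_marker_count marker_count marker_count_alt
  simp only
  by_cases hm : markers = []
  · simp [hm]
  · rw [if_neg hm]
    by_cases hp : markers.filter (fun m => decide (m ≠ "")) = []
    · rw [if_pos hp, foldl_count]
      have hcz : lines.countP
          (fun line => ((PySem.List.dedup markers).filter (fun m => decide (m ≠ ""))).any
            (fun m => PySem.Str.isIn m line)) = 0 := by
        refine List.countP_eq_zero.mpr (fun l _ => ?_)
        simp only [per_line, hp, pvSearch_eq_true_iff]
        simp
      rw [hcz]; norm_num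
    · rw [if_neg hp, foldl_count]
      have hfun : (fun line => ((PySem.List.dedup markers).filter (fun m => decide (m ≠ ""))).any
            (fun m => PySem.Str.isIn m line))
          = (fun line => pvSearch (markers.filter (fun m => decide (m ≠ ""))) line.toList) :=
        funext (per_line markers)
      rw [hfun]; ring
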